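-- pv_equiv track=rewrite | github.com/iveskins/twittback | twittback/client/twitter_client.py | perform_replaces
-- ===== SOURCE A (Python) =====
-- def perform_replaces(text, replacements):
--     res = ""
--     i = 0
--     while i < len(text):
--         if i in replacements:
--             end, replacement_str = replacements[i]
--             res += replacement_str
--             i = end
--         else:
--             res += text[i]
--             i += 1
--     return res
-- ===== SOURCE B (Python) =====
-- def perform_replaces(text, replacements):
--     parts = []
--     pos = 0
--     n = len(text)
--     for key in sorted(replacements):
--         if pos <= key < n:
--             end, rep = replacements[key]
--             parts.append(text[pos:key])
--             parts.append(rep)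
--             pos = end
--     parts.append(text[pos:])
--     return "".join(parts)
-- ===== Notes on version B (the rewrite author's own statement) =====
-- stated objective: alternative
-- what changed: B iterates once over the sorted replacement keys with a cursor, copying untouched text in whole slices and joining parts at the end, instead of A's character-by-character walk with repeated string concatenation.
-- outside the precondition, e.g. on perform_replaces('abc', {0: (2, 'X'), 2: (1, 'Y'), 1: (3, 'Z')}): A returns 'XYZ', B returns 'XYbc'; on perform_replaces('ab', {0: (0, 'X')}): A does not finish within the time limit, B returns 'Xab'
import Mathlib
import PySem

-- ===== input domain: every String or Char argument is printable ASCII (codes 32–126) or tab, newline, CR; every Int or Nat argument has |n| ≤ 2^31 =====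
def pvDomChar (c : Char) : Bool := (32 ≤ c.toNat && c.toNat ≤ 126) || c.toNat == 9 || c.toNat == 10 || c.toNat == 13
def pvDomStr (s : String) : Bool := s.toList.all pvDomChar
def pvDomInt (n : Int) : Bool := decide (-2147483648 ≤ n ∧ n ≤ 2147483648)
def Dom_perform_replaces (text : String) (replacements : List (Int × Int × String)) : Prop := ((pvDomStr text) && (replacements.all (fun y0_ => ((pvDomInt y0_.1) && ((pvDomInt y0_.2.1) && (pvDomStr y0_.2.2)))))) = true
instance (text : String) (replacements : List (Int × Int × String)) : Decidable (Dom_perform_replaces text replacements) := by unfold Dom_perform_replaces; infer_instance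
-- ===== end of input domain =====

-- B replaces A's character-by-character walk by one pass over the sorted replacement keys with a cursor,
-- copying untouched text in whole slices (an alternative decomposition; same result on Pre_).


-- ===== PORT A =====
-- dict lookup (first match), as `replacements[i]` / `i in replacements` on the association list
def prLookup (replacements : List (Int × Int × String)) (i : Int) : Option (Int × String) :=
  (replacements.find? (fun p => p.1 == i)).map (·.2)

-- the `while i < len(text)` loop; fuel bounds the iterations (under Pre_ each step increases i,
-- so fuel = len(text) suffices; the fuel-0 and IndexError fallbacks are unreachable under Pre_)
def prLoopA (cs : List Char) (replacements : List (Int × Int × String)) :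
    Nat → Int → List Char → List Char
  | 0, _, res => res
  | fuel + 1, i, res =>
    if i < (cs.length : Int) then
      match prLookup replacements i with
      | some (e, s) => prLoopA cs replacements fuel e (res ++ s.toList)
      | none =>
        match PySem.List.pyGet? cs i with
        | some c => prLoopA cs replacements fuel (i + 1) (res ++ [c])
        | none => res
    else res

def perform_replaces (text : String) (replacements : List (Int × Int × String)) : String :=
  String.ofList (prLoopA text.toList replacements text.toList.length 0 [])

-- ===== PORT B =====
-- sorted(replacements): the dict's keys (first occurrences), sorted
def prKeys (replacements : List (Int × Int × String)) : List Int :=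
  PySem.List.sorted (PySem.List.dedup (replacements.map (·.1))) (fun x => x) false

-- loop body of B: state = (pos, parts accumulated so far, as chars)
def prStepB (cs : List Char) (replacements : List (Int × Int × String))
    (st : Int × List Char) (k : Int) : Int × List Char :=
  if st.1 ≤ k ∧ k < (cs.length : Int) then
    match prLookup replacements k with
    | some (e, s) => (e, st.2 ++ PySem.List.slice cs (some st.1) (some k) ++ s.toList)
    | none => st   -- unreachable: k is a key of the dict
  else st

def perform_replaces_alt (text : String) (replacements : List (Int × Int × String)) : String :=
  let cs := text.toList
  let st := (prKeys replacements).foldl (prStepB cs replacements) (0, [])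
  String.ofList (st.2 ++ PySem.List.slice cs (some st.1) none)

-- ===== PRECONDITION & SPEC =====
-- Pre_ excludes inputs where some replacement at an in-range key k has end ≤ k: on those A either
-- loops forever, or (when that key is jumped over or re-reached by a backward jump) returns an
-- accidental value obtained by re-walking already-consumed text.
def Pre_perform_replaces (text : String) (replacements : List (Int × Int × String)) : Prop :=
  ∀ p ∈ replacements, 0 ≤ p.1 → p.1 < (text.toList.length : Int) → p.1 < p.2.1

instance (text : String) (replacements : List (Int × Int × String)) : Decidable (Pre_perform_replaces text replacements) := by unfold Pre_perform_replaces; infer_instance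

def pvWitness_perform_replaces : String × (List (Int × Int × String)) :=
  ("abcde", [(1, 3, "XY"), (4, 5, "Z")])

def Spec_perform_replaces (text : String) (replacements : List (Int × Int × String)) (out : String) : Prop := out = perform_replaces_alt text replacements
instance (text : String) (replacements : List (Int × Int × String)) (out : String) : Decidable (Spec_perform_replaces text replacements out) := by unfold Spec_perform_replaces; infer_instance

-- ===== CLAIM (what is proved, stated in full; the proofs are below) =====
def Claim_equal_perform_replaces : Prop := ∀ (text : String) (replacements : List (Int × Int × String)), Dom_perform_replaces text replacements → Pre_perform_replaces text replacements → Spec_perform_replaces text replacements (perform_replaces text replacements)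

-- ===== LEMMAS AND PROOFS =====

-- a successful lookup names a pair of the list
theorem prLookup_mem (repl : List (Int × Int × String)) (i : Int) (v : Int × String)
    (h : prLookup repl i = some v) : ∃ p ∈ repl, p.1 = i ∧ p.2 = v := by
  unfold prLookup at h
  cases hf : repl.find? (fun p => p.1 == i) with
  | none => rw [hf] at h; simp at h
  | some p =>
    rw [hf] at h
    refine ⟨p, List.mem_of_find?_eq_some hf, ?_, ?_⟩
    · have := List.find?_some hf; simpa using this
    · simpa using h

-- A's loop: the accumulator factors out
theorem prLoopA_acc (cs : List Char) (repl : List (Int × Int × String)) :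
    ∀ (fuel : Nat) (i : Int) (res : List Char),
      prLoopA cs repl fuel i res = res ++ prLoopA cs repl fuel i [] := by
  intro fuel
  induction fuel with
  | zero => intro i res; simp [prLoopA]
  | succ f ih =>
    intro i res
    simp only [prLoopA]
    split
    · cases h : prLookup repl i with
      | some v =>
        obtain ⟨e, s⟩ := v
        dsimp only
        rw [ih e (res ++ s.toList), ih e ([] ++ s.toList)]
        simp
      | none =>
        cases h2 : PySem.List.pyGet? cs i with
        | some c =>
          dsimp only
          rw [ih (i + 1) (res ++ [c]), ih (i + 1) ([] ++ [c])]
          simp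
        | none => simp
    · simp

-- B's loop body: the accumulator factors out
theorem prStepB_acc (cs : List Char) (repl : List (Int × Int × String))
    (i : Int) (acc : List Char) (k : Int) :
    prStepB cs repl (i, acc) k
      = ((prStepB cs repl (i, []) k).1, acc ++ (prStepB cs repl (i, []) k).2) := by
  simp only [prStepB]
  split
  · cases h : prLookup repl k with
    | some v => obtain ⟨e, s⟩ := v; simp
    | none => simp
  · simp

-- B's fold: the accumulator factors out
theorem prFoldB_acc (cs : List Char) (repl : List (Int × Int × String)) :
    ∀ (ks : List Int) (i : Int) (acc : List Char),
      ks.foldl (prStepB cs repl) (i, acc)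
        = ((ks.foldl (prStepB cs repl) (i, [])).1,
           acc ++ (ks.foldl (prStepB cs repl) (i, [])).2) := by
  intro ks
  induction ks with
  | nil => intro i acc; simp
  | cons k ks ih =>
    intro i acc
    simp only [List.foldl_cons]
    rw [prStepB_acc cs repl i acc k]
    rcases hP : prStepB cs repl (i, []) k with ⟨p1, p2⟩
    dsimp only
    rw [ih p1 (acc ++ p2), ih p1 p2]
    simp

-- B's fold skips every key outside the window
theorem prFoldB_skip (cs : List Char) (repl : List (Int × Int × String)) :
    ∀ (ks : List Int) (i : Int) (acc : List Char),
      (∀ k ∈ ks, ¬ (i ≤ k ∧ k < (cs.length : Int))) →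
      ks.foldl (prStepB cs repl) (i, acc) = (i, acc) := by
  intro ks
  induction ks with
  | nil => intro i acc _; rfl
  | cons k ks ih =>
    intro i acc h
    simp only [List.foldl_cons]
    have hk : prStepB cs repl (i, acc) k = (i, acc) := by
      simp only [prStepB]
      rw [if_neg (h k (by simp))]
    rw [hk]
    exact ih i acc (fun k' hk' => h k' (by simp [hk']))

-- B's pure result from cursor i
def prRunB (cs : List Char) (repl : List (Int × Int × String)) (ks : List Int) (i : Int) :
    List Char :=
  (ks.foldl (prStepB cs repl) (i, [])).2
    ++ PySem.List.slice cs (some (ks.foldl (prStepB cs repl) (i, [])).1) none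

-- a nonempty suffix slice peels its first character
theorem prSliceFrom_cons (cs : List Char) (i : Int) (h0 : 0 ≤ i) (hn : i.toNat < cs.length) :
    PySem.List.slice cs (some i) none
      = cs[i.toNat] :: PySem.List.slice cs (some (i + 1)) none := by
  rw [PySem.List.slice_from cs h0, PySem.List.slice_from cs (by omega)]
  have : (i + 1).toNat = i.toNat + 1 := by omega
  rw [this]
  exact List.drop_eq_getElem_cons hn

-- a nonempty bounded slice peels its first character
theorem prSlice_cons (cs : List Char) (i k : Int) (h0 : 0 ≤ i) (hik : i < k)
    (hn : i.toNat < cs.length) :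
    PySem.List.slice cs (some i) (some k)
      = cs[i.toNat] :: PySem.List.slice cs (some (i + 1)) (some k) := by
  rw [PySem.List.slice_toNat cs h0 (by omega), PySem.List.slice_toNat cs (by omega) (by omega)]
  have h1 : (i + 1).toNat = i.toNat + 1 := by omega
  have h2 : k.toNat - i.toNat = (k.toNat - (i.toNat + 1)) + 1 := by omega
  rw [h1, h2, List.drop_eq_getElem_cons hn]
  rfl

-- the empty slice
theorem prSlice_self (cs : List Char) (i : Int) (h0 : 0 ≤ i) :
    PySem.List.slice cs (some i) (some i) = [] := by
  rw [PySem.List.slice_toNat cs h0 h0]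
  simp

-- stepping B's cursor over a non-key character
theorem prRunB_cons_char (cs : List Char) (repl : List (Int × Int × String)) :
    ∀ (ks : List Int) (i : Int),
      (∀ k ∈ ks, (prLookup repl k).isSome) →
      prLookup repl i = none →
      0 ≤ i → (hn : i.toNat < cs.length) →
      prRunB cs repl ks i = cs[i.toNat] :: prRunB cs repl ks (i + 1) := by
  intro ks
  induction ks with
  | nil =>
    intro i _ _ h0 hn
    simp only [prRunB, List.foldl_nil]
    simpa using prSliceFrom_cons cs i h0 hn
  | cons k ks ih =>
    intro i hks hnone h0 hn
    by_cases hc : i ≤ k ∧ k < (cs.length : Int)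
    · -- k is processed from both cursors (k ≠ i since i is no key)
      have hkey : (prLookup repl k).isSome := hks k (by simp)
      have hki : k ≠ i := by intro h; rw [h, hnone] at hkey; simp at hkey
      have hik : i < k := by omega
      cases hlk : prLookup repl k with
      | none => rw [hlk] at hkey; simp at hkey
      | some v =>
        obtain ⟨e, s⟩ := v
        simp only [prRunB, List.foldl_cons]
        have hstep1 : prStepB cs repl (i, []) k
            = (e, [] ++ PySem.List.slice cs (some i) (some k) ++ s.toList) := by
          simp only [prStepB]; rw [if_pos hc, hlk]
        have hstep2 : prStepB cs repl (i + 1, []) k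
            = (e, [] ++ PySem.List.slice cs (some (i + 1)) (some k) ++ s.toList) := by
          simp only [prStepB]; rw [if_pos (by omega : i + 1 ≤ k ∧ k < (cs.length : Int)), hlk]
        rw [hstep1, hstep2]
        rw [prFoldB_acc cs repl ks e ([] ++ PySem.List.slice cs (some i) (some k) ++ s.toList),
            prFoldB_acc cs repl ks e ([] ++ PySem.List.slice cs (some (i + 1)) (some k) ++ s.toList)]
        rw [prSlice_cons cs i k h0 hik hn]
        simp
    · -- k is skipped from both cursors
      have hc2 : ¬ (i + 1 ≤ k ∧ k < (cs.length : Int)) := by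
        intro h; exact hc ⟨by omega, h.2⟩
      simp only [prRunB, List.foldl_cons]
      have hstep1 : prStepB cs repl (i, []) k = (i, []) := by
        simp only [prStepB]; rw [if_neg hc]
      have hstep2 : prStepB cs repl (i + 1, []) k = (i + 1, []) := by
        simp only [prStepB]; rw [if_neg hc2]
      rw [hstep1, hstep2]
      exact ih i (fun k' hk' => hks k' (by simp [hk'])) hnone h0 hn

-- main invariant: A's fuelled walk from i equals B's fold from cursor i
theorem prMain (cs : List Char) (repl : List (Int × Int × String))
    (hpre : ∀ p ∈ repl, 0 ≤ p.1 → p.1 < (cs.length : Int) → p.1 < p.2.1) :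
    ∀ (fuel : Nat) (i : Int) (ks : List Int),
      0 ≤ i → (cs.length : Int) ≤ i + fuel →
      ks.Pairwise (· < ·) →
      (∀ k ∈ ks, (prLookup repl k).isSome) →
      (∀ k : Int, (prLookup repl k).isSome → i ≤ k → k ∈ ks) →
      prLoopA cs repl fuel i [] = prRunB cs repl ks i := by
  intro fuel
  induction fuel with
  | zero =>
    intro i ks h0 hfuel hpw hks hcomplete
    have hge : (cs.length : Int) ≤ i := by omega
    have hskip : ∀ k ∈ ks, ¬ (i ≤ k ∧ k < (cs.length : Int)) := by
      intro k _ ⟨h1, h2⟩; omega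
    simp only [prLoopA, prRunB]
    rw [prFoldB_skip cs repl ks i [] hskip]
    rw [PySem.List.slice_from cs h0]
    rw [List.drop_eq_nil_of_le (by omega)]
    rfl
  | succ f ih =>
    intro i ks h0 hfuel hpw hks hcomplete
    by_cases hlen : i < (cs.length : Int)
    · simp only [prLoopA]
      rw [if_pos hlen]
      cases hl : prLookup repl i with
      | some v =>
        obtain ⟨e, s⟩ := v
        -- i is a key: it is in ks; split ks around it
        have hmem : i ∈ ks := hcomplete i (by rw [hl]; rfl) le_rfl
        obtain ⟨l1, l2, rfl⟩ := List.append_of_mem hmem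
        rw [List.pairwise_append] at hpw
        obtain ⟨hpw1, hpw2, hcross⟩ := hpw
        have hl1_lt : ∀ a ∈ l1, a < i := fun a ha => hcross a ha i (by simp)
        -- i < e from Pre_
        dsimp only
        have hie : i < e := by
          obtain ⟨p, hp, hp1, hp2⟩ := prLookup_mem repl i (e, s) hl
          have := hpre p hp (by omega) (by omega)
          rw [hp1, hp2] at this; exact this
        -- A side
        rw [prLoopA_acc cs repl f e]
        -- B side
        simp only [prRunB, List.foldl_append, List.foldl_cons]
        rw [prFoldB_skip cs repl l1 i []
          (fun k hk => by have := hl1_lt k hk; omega)]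
        have hstep : prStepB cs repl (i, []) i = (e, s.toList) := by
          simp only [prStepB]
          rw [if_pos ⟨le_rfl, hlen⟩, hl, prSlice_self cs i h0]
          simp
        rw [hstep]
        rw [prFoldB_acc cs repl l2 e s.toList]
        have hrec := ih e l2 (by omega) (by omega)
          (List.Pairwise.sublist (by simp) hpw2)
          (fun k hk => hks k (by simp [hk]))
          (fun k hk hek => by
            have hik : i ≤ k := by omega
            have := hcomplete k hk hik
            simp only [List.mem_append, List.mem_cons] at this
            rcases this with h | h | h
            · exact absurd (hl1_lt k h) (by omega)
            · omega
            · exact h)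
        simp only [prRunB] at hrec
        simp [hrec]
      | none =>
        -- i is not a key: copy the character
        have hn : i.toNat < cs.length := by omega
        have hget : PySem.List.pyGet? cs i = some cs[i.toNat] := by
          have h1 : PySem.List.pyGet? cs ((i.toNat : Nat) : Int) = cs[i.toNat]? :=
            PySem.List.pyGet?_natCast cs i.toNat
          rw [Int.toNat_of_nonneg h0] at h1
          rw [h1, List.getElem?_eq_getElem hn]
        rw [hget]
        dsimp only
        rw [prLoopA_acc cs repl f (i + 1)]
        rw [prRunB_cons_char cs repl ks i hks hl h0 hn]
        have hrec := ih (i + 1) ks (by omega) (by omega) hpw hks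
          (fun k hk h1k => hcomplete k hk (by omega))
        rw [hrec]
        simp
    · -- i past the end: both sides are empty
      have hskip : ∀ k ∈ ks, ¬ (i ≤ k ∧ k < (cs.length : Int)) := by
        intro k _ ⟨h1, h2⟩; omega
      simp only [prLoopA]
      rw [if_neg hlen]
      simp only [prRunB]
      rw [prFoldB_skip cs repl ks i [] hskip]
      rw [PySem.List.slice_from cs h0]
      rw [List.drop_eq_nil_of_le (by omega)]
      rfl

-- instantiating ks with B's sorted, deduplicated key list
theorem prKeys_pairwise (repl : List (Int × Int × String)) :
    (prKeys repl).Pairwise (· < ·) := by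
  unfold prKeys
  rw [PySem.List.dedup_eq_ofList]
  exact PySem.List.sorted_ofList_pairwise_lt _

theorem prKeys_isSome (repl : List (Int × Int × String)) :
    ∀ k ∈ prKeys repl, (prLookup repl k).isSome := by
  intro k hk
  unfold prKeys at hk
  rw [PySem.List.mem_sorted] at hk
  rw [PySem.List.mem_dedup] at hk
  obtain ⟨p, hp, hpk⟩ := List.mem_map.mp hk
  unfold prLookup
  rw [Option.isSome_map]
  rw [List.find?_isSome]
  exact ⟨p, hp, by simp [hpk]⟩

theorem prKeys_complete (repl : List (Int × Int × String)) :
    ∀ k : Int, (prLookup repl k).isSome → k ∈ prKeys repl := by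
  intro k hk
  unfold prLookup at hk
  rw [Option.isSome_map] at hk
  cases hf : repl.find? (fun p => p.1 == k) with
  | none => rw [hf] at hk; simp at hk
  | some p =>
    have hp := List.mem_of_find?_eq_some hf
    have hpk : p.1 = k := by have := List.find?_some hf; simpa using this
    unfold prKeys
    rw [PySem.List.mem_sorted, PySem.List.mem_dedup]
    exact List.mem_map.mpr ⟨p, hp, hpk⟩

-- ===== VERDICT (by name: the statement is the Claim_ definition above) =====
theorem perform_replaces_spec : Claim_equal_perform_replaces := by
  intro text repl _ hpre
  unfold Spec_perform_replaces perform_replaces perform_replaces_alt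
  have h := prMain text.toList repl hpre text.toList.length 0 (prKeys repl)
    le_rfl (by omega) (prKeys_pairwise repl) (prKeys_isSome repl)
    (fun k hk _ => prKeys_complete repl k hk)
  simp only [prRunB] at h
  rw [h]
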